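-- pv_equiv track=rewrite | github.com/alexandrerenuccipro-bit/RenucciAlexandre | renucci_alexandre_atelier_3.py | outputStr
-- ===== SOURCE A (Python) =====
-- def outputStr(mot: str, lpos: list) -> str:
--     """
--         Renvoie le mot formatté en fonction des positions des lettre dans un mot.
--
--         Args:
--             mot (str): Le mot
--             lpos (list): La liste des positions
--
--         Returns:
--             str: Le mot formatté
--     """
--     result = ""
--     for i in range(len(mot)):
--         if i in lpos:
--             result += mot[i] + " "
--         else:
--             result += "_ "
--     return result.strip()
-- ===== SOURCE B (Python) =====
-- def outputStr(mot: str, lpos: list) -> str: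
--     slots = ["_"] * len(mot)
--     for p in lpos:
--         if 0 <= p < len(mot):
--             slots[p] = mot[p]
--     return " ".join(slots).strip()
-- ===== Notes on version B (the rewrite author's own statement) =====
-- stated objective: faster
-- what changed: B scatters revealed letters into a preallocated placeholder list with a single pass over lpos and joins once, instead of A's per-index 'i in lpos' membership scan, turning O(len(mot)*len(lpos)) into O(len(mot)+len(lpos)).
import Mathlib
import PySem

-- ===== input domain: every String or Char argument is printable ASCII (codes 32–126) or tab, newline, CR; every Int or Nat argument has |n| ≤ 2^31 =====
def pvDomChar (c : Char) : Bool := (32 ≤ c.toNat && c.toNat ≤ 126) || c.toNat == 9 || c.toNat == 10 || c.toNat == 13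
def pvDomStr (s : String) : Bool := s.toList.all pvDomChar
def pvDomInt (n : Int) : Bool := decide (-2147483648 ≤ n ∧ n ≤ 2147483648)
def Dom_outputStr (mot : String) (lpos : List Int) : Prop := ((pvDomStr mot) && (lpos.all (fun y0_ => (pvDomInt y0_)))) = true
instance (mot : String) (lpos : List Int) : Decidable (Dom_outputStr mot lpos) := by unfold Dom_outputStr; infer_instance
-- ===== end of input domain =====

-- B replaces A's per-index membership scan by a single scatter pass over lpos into a placeholder list, joined once (alternative decomposition).

-- ===== PORT A =====
-- result accumulates "letter+space" or "_ " for each index, then is stripped.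
def outputStr (mot : String) (lpos : List Int) : String :=
  let cs := mot.toList
  let result : List Char :=
    (List.range cs.length).foldl
      (fun acc i =>
        if lpos.contains (Int.ofNat i) then acc ++ [cs.getD i ' ', ' ']
        else acc ++ ['_', ' '])
      []
  String.mk (PySem.Chars.strip result)

-- ===== PORT B =====
-- slots = ["_"]*len(mot); scatter mot[p] at each in-range p; " ".join(slots).strip()
def outputStr_alt (mot : String) (lpos : List Int) : String :=
  let cs := mot.toList
  let slots : List Char :=
    lpos.foldl
      (fun sl p =>
        if 0 ≤ p ∧ p < (cs.length : Int) then sl.set p.toNat (cs.getD p.toNat ' ')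
        else sl)
      (List.replicate cs.length '_')
  String.mk (PySem.Chars.strip (PySem.Chars.join [' '] (slots.map (fun c => [c]))))

-- ===== PRECONDITION & SPEC =====
def Spec_outputStr (mot : String) (lpos : List Int) (out : String) : Prop := out = outputStr_alt mot lpos
instance (mot : String) (lpos : List Int) (out : String) : Decidable (Spec_outputStr mot lpos out) := by unfold Spec_outputStr; infer_instance

-- ===== CLAIM (what is proved, stated in full; the proofs are below) =====
def Claim_equal_outputStr : Prop := ∀ (mot : String) (lpos : List Int), Dom_outputStr mot lpos → Spec_outputStr mot lpos (outputStr mot lpos)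

-- ===== LEMMAS AND PROOFS =====

-- token produced for index i
def pvTok (cs : List Char) (lpos : List Int) (i : Nat) : Char :=
  if lpos.contains (Int.ofNat i) then cs.getD i ' ' else '_'

lemma pvA_fold (cs : List Char) (lpos : List Int) :
    ∀ (n : Nat) (acc : List Char),
      (List.range n).foldl
        (fun acc i =>
          if lpos.contains (Int.ofNat i) then acc ++ [cs.getD i ' ', ' ']
          else acc ++ ['_', ' ']) acc
      = acc ++ (List.range n).flatMap (fun i => [pvTok cs lpos i, ' ']) := by
  intro n
  induction n with
  | zero => intro acc; simp
  | succ n ih =>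
    intro acc
    rw [List.range_succ, List.foldl_append, ih, List.flatMap_append]
    simp [pvTok]
    split_ifs <;> simp

lemma pvScatter_len (cs : List Char) (lpos : List Int) :
    ∀ (sl : List Char),
      (lpos.foldl
        (fun sl p =>
          if 0 ≤ p ∧ p < (cs.length : Int) then sl.set p.toNat (cs.getD p.toNat ' ')
          else sl) sl).length = sl.length := by
  induction lpos with
  | nil => intro sl; rfl
  | cons p rest ih =>
    intro sl
    simp only [List.foldl_cons]
    rw [ih]
    split_ifs <;> simp

lemma pvScatter_get (cs : List Char) (lpos : List Int) :
    ∀ (sl : List Char), sl.length = cs.length →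
      ∀ (i : Nat) (hi : i < sl.length),
      (lpos.foldl
        (fun sl p =>
          if 0 ≤ p ∧ p < (cs.length : Int) then sl.set p.toNat (cs.getD p.toNat ' ')
          else sl) sl)[i]'(by rw [pvScatter_len]; exact hi)
      = if lpos.contains (Int.ofNat i) then cs.getD i ' ' else sl[i] := by
  induction lpos with
  | nil => intro sl _ i hi; simp
  | cons p rest ih =>
    intro sl hlen i hi
    simp only [List.foldl_cons]
    by_cases hg : 0 ≤ p ∧ p < (cs.length : Int)
    · have hset : (sl.set p.toNat (cs.getD p.toNat ' ')).length = cs.length := by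
        simpa using hlen
      simp only [if_pos hg]
      rw [ih _ hset i (by simpa using hi)]
      by_cases hp : p.toNat = i
      · have hpe : p = (i : Int) := by omega
        simp [hpe]
      · have hne : (i : Int) ≠ p := by omega
        simp [hne, hp]
    · simp only [if_neg hg]
      rw [ih sl hlen i hi]
      have hne : (i : Int) ≠ p := by
        intro hh
        exact hg ⟨by omega, by omega⟩
      simp [hne]

lemma pvSlots_eq (cs : List Char) (lpos : List Int) :
    (lpos.foldl
      (fun sl p =>
        if 0 ≤ p ∧ p < (cs.length : Int) then sl.set p.toNat (cs.getD p.toNat ' ')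
        else sl)
      (List.replicate cs.length '_'))
    = (List.range cs.length).map (pvTok cs lpos) := by
  apply List.ext_getElem
  · rw [pvScatter_len]; simp
  · intro i h1 h2
    have hi : i < (List.replicate cs.length '_').length := by
      simpa using (by simpa using h2 : i < cs.length)
    rw [pvScatter_get cs lpos (List.replicate cs.length '_') (by simp) i hi]
    simp [pvTok]

lemma pvFlatMap_join (ts : List Char) (h : ts ≠ []) :
    ts.flatMap (fun t => [t, ' '])
    = PySem.Chars.join [' '] (ts.map (fun c => [c])) ++ [' '] := by
  induction ts with
  | nil => exact absurd rfl h
  | cons t rest ih =>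
    cases rest with
    | nil => simp [PySem.Chars.join, List.intercalate]
    | cons u rrest =>
      simp only [List.flatMap_cons, ih (by simp), List.map_cons]
      rw [PySem.Chars.join_cons_cons]
      simp

lemma pvIsspace_space : PySem.Chars.isspace ' ' = true := by decide

lemma pvRstrip_append_space (l : List Char) :
    PySem.Chars.rstrip (l ++ [' ']) = PySem.Chars.rstrip l := by
  simp [PySem.Chars.rstrip, pvIsspace_space]

lemma pvStrip_append_space (l : List Char) :
    PySem.Chars.strip (l ++ [' ']) = PySem.Chars.strip l := by
  unfold PySem.Chars.strip PySem.Chars.lstrip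
  rw [List.dropWhile_append]
  by_cases he : (List.dropWhile PySem.Chars.isspace l).isEmpty
  · have hnil : List.dropWhile PySem.Chars.isspace l = [] := List.isEmpty_iff.mp he
    simp [hnil, pvIsspace_space]
  · simp [he]
    exact pvRstrip_append_space _

-- ===== VERDICT (by name: the statement is the Claim_ definition above) =====
theorem outputStr_spec : Claim_equal_outputStr := by
  intro mot lpos _
  unfold Spec_outputStr outputStr outputStr_alt
  simp only []
  rw [pvA_fold, pvSlots_eq]
  by_cases hn : mot.toList.length = 0
  · simp [hn, PySem.Chars.join, List.intercalate]
  · have h : (List.range mot.toList.length).map (pvTok mot.toList lpos) ≠ [] := by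
      simp only [ne_eq, List.map_eq_nil_iff, List.range_eq_nil]
      exact hn
    rw [List.nil_append,
        show (List.range mot.toList.length).flatMap (fun i => [pvTok mot.toList lpos i, ' '])
            = ((List.range mot.toList.length).map (pvTok mot.toList lpos)).flatMap
                (fun t => [t, ' ']) from by rw [List.flatMap_map],
        pvFlatMap_join _ h, pvStrip_append_space]
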